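-- pv_equiv track=rewrite | github.com/BearFishSheep/test | Reverse words.py | reverse_words
-- ===== SOURCE A (Python) =====
-- def reverse_words(text):
-- 	ls = text.split()
-- 	ls1 = []
-- 	for i in ls:
-- 		j = i[::-1]		#字符串翻转（用切片）
-- 		ls1.append(j)
-- 	a = ' '.join(ls1)
-- 	return a
-- ===== SOURCE B (Python) =====
-- def reverse_words(text):
--     return ' '.join(text[::-1].split()[::-1])
-- ===== Notes on version B (the rewrite author's own statement) =====
-- stated objective: idiomatic
-- what changed: Replaces the per-word reversal loop with one global string reversal, a split of the reversed string, and a reversal of the resulting word list, joined in a single expression.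
import Mathlib
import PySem

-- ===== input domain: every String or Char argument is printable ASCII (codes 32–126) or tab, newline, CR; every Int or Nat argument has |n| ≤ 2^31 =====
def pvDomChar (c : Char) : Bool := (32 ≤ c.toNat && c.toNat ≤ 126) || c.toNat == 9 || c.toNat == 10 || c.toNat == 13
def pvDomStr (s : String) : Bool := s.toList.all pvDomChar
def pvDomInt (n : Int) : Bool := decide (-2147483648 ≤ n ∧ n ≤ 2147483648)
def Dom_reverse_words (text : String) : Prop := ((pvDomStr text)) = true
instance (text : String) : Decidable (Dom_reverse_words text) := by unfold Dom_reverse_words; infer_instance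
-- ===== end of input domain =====

-- B reverses the whole string once, splits, and reverses the word list — one idiomatic
-- expression instead of A's per-word reversal loop (same cost).


-- ===== PORT A =====
-- ls = text.split(); loop appending i[::-1]; ' '.join.  slice? never returns none for step -1,
-- so the .getD "" default is unreachable.
def reverse_words (text : String) : String :=
  let ls := PySem.Str.split₀ text
  let ls1 := ls.foldl (fun acc i => acc ++ [(PySem.Str.slice? i none none (-1)).getD ""]) []
  PySem.Str.join " " ls1

-- ===== PORT B =====
-- ' '.join(text[::-1].split()[::-1])
def reverse_words_alt (text : String) : String :=
  PySem.Str.join " "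
    ((PySem.List.slice? (PySem.Str.split₀ ((PySem.Str.slice? text none none (-1)).getD "")) none none (-1)).getD [])

-- ===== PRECONDITION & SPEC =====
def Spec_reverse_words (text : String) (out : String) : Prop := out = reverse_words_alt text
instance (text : String) (out : String) : Decidable (Spec_reverse_words text out) := by unfold Spec_reverse_words; infer_instance

-- ===== CLAIM (what is proved, stated in full; the proofs are below) =====
def Claim_equal_reverse_words : Prop := ∀ (text : String), Dom_reverse_words text → Spec_reverse_words text (reverse_words text)

-- ===== LEMMAS AND PROOFS =====

-- A's append-loop is a map.
theorem foldl_append_map {α β : Type} (f : α → β) (l : List α) (acc : List β) :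
    l.foldl (fun acc i => acc ++ [f i]) acc = acc ++ l.map f := by
  induction l generalizing acc with
  | nil => simp
  | cons x xs ih => simp [List.foldl, ih]

theorem modifyHead_id {α : Type} (l : List α) : List.modifyHead (fun x => x) l = l := by
  cases l <;> rfl

theorem modifyLast_nil {α : Type} (f : α → α) : List.modifyLast f ([] : List α) = [] := rfl

theorem modifyLast_singleton {α : Type} (f : α → α) (a : α) :
    List.modifyLast f [a] = [f a] := by
  simpa using List.modifyLast_concat f a []

theorem modifyLast_cons_of_ne_nil {α : Type} (f : α → α) (a : α) (l : List α) (h : l ≠ []) :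
    List.modifyLast f (a :: l) = a :: List.modifyLast f l := by
  simpa using List.modifyLast_append_of_right_ne_nil f [a] l h

-- split₀.go characterized via splitOnP.
theorem split₀_go_eq (cs : List Char) (cur : List Char) (acc : List (List Char)) :
    PySem.Chars.split₀.go cs cur acc =
      acc.reverse ++ List.filter (fun w => !w.isEmpty)
        (List.modifyHead (cur.reverse ++ ·) (List.splitOnP (fun c => PySem.Chars.isspace c) cs)) := by
  induction cs generalizing cur acc with
  | nil => cases cur <;> simp [PySem.Chars.split₀.go]
  | cons c rest ih =>
    by_cases hs : PySem.Chars.isspace c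
    · cases cur with
      | nil => simp [PySem.Chars.split₀.go, hs, ih, List.splitOnP_cons, modifyHead_id]
      | cons a t =>
        simp only [PySem.Chars.split₀.go, hs, List.isEmpty_cons,
          if_neg (by simp : ¬(false = true)), ih]
        simp [List.splitOnP_cons, hs, modifyHead_id]
    · simp only [PySem.Chars.split₀.go, if_neg (by simp [hs] : ¬PySem.Chars.isspace c = true), ih]
      simp only [List.splitOnP_cons, if_neg (by simp [hs] : ¬((fun c => PySem.Chars.isspace c) c = true)),
        List.modifyHead_modifyHead]
      have hfun : (fun x => (c :: cur).reverse ++ x) = ((fun x => cur.reverse ++ x) ∘ List.cons c) := by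
        funext x; simp
      rw [hfun]

theorem split₀_eq_filter (cs : List Char) :
    PySem.Chars.split₀ cs =
      List.filter (fun w => !w.isEmpty) (List.splitOnP (fun c => PySem.Chars.isspace c) cs) := by
  have := split₀_go_eq cs [] []
  simpa [PySem.Chars.split₀, modifyHead_id] using this

-- modifyHead/modifyLast bookkeeping.
theorem modifyHead_cons_modifyLast {α : Type} (x : α) (c : α) (L : List (List α)) :
    List.modifyHead (x :: ·) (List.modifyLast (· ++ [c]) L) =
      List.modifyLast (· ++ [c]) (List.modifyHead (x :: ·) L) := by
  rcases List.eq_nil_or_concat L with rfl | ⟨init, last, rfl⟩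
  · simp [modifyLast_nil]
  · rw [List.concat_eq_append, List.modifyLast_concat]
    cases init with
    | nil => simp [modifyLast_singleton]
    | cons i0 irest =>
      simp only [List.cons_append, List.modifyHead_cons]
      rw [show ((x :: i0) :: (irest ++ [last]) : List (List α)) = ((x :: i0) :: irest) ++ [last] by simp,
        List.modifyLast_concat]
      simp

theorem reverse_modifyHead {α : Type} (f : α → α) (M : List α) :
    (List.modifyHead f M).reverse = List.modifyLast f M.reverse := by
  cases M with
  | nil => simp [modifyLast_nil]
  | cons h t => simp [List.modifyLast_concat]

theorem map_reverse_modifyHead_cons {α : Type} (c : α) (l : List (List α)) :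
    (List.modifyHead (c :: ·) l).map List.reverse =
      List.modifyHead (· ++ [c]) (l.map List.reverse) := by
  cases l <;> simp

-- appending a non-separator extends the last chunk.
theorem splitOnP_concat {α : Type} (p : α → Bool) (c : α) (hc : p c = false) (xs : List α) :
    List.splitOnP p (xs ++ [c]) = List.modifyLast (· ++ [c]) (List.splitOnP p xs) := by
  induction xs with
  | nil => simp [List.splitOnP_cons, hc, modifyLast_singleton]
  | cons x rest ih =>
    by_cases hx : p x
    · have hSne := List.splitOnP_ne_nil p rest
      rw [List.cons_append, List.splitOnP_cons, List.splitOnP_cons, if_pos hx, if_pos hx, ih,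
        modifyLast_cons_of_ne_nil _ _ _ hSne]
    · rw [List.cons_append, List.splitOnP_cons, List.splitOnP_cons,
        if_neg (by simp [hx]), if_neg (by simp [hx]), ih, modifyHead_cons_modifyLast]

-- splitting the reversed list gives the reversed chunks in reverse order.
theorem splitOnP_reverse {α : Type} (p : α → Bool) (cs : List α) :
    List.splitOnP p cs.reverse = ((List.splitOnP p cs).map List.reverse).reverse := by
  induction cs with
  | nil => simp
  | cons c rest ih =>
    by_cases hc : p c
    · rw [List.reverse_cons, show ([c] : List α) = c :: [] from rfl,
        List.splitOnP_append_cons p _ _ c hc, ih, List.splitOnP_cons, if_pos hc]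
      simp
    · rw [List.reverse_cons, splitOnP_concat p c (by simp [hc]) _, ih, List.splitOnP_cons,
        if_neg (by simp [hc]), map_reverse_modifyHead_cons, reverse_modifyHead]

theorem split₀_reverse (cs : List Char) :
    PySem.Chars.split₀ cs.reverse = ((PySem.Chars.split₀ cs).map List.reverse).reverse := by
  rw [split₀_eq_filter, split₀_eq_filter, splitOnP_reverse, List.filter_reverse, List.filter_map]
  have : ∀ w ∈ List.splitOnP (fun c => PySem.Chars.isspace c) cs,
      ((fun w => !w.isEmpty) ∘ List.reverse) w = (fun w => !w.isEmpty) w := by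
    intro w _
    show (!w.reverse.isEmpty) = !w.isEmpty
    rw [List.isEmpty_reverse]
  rw [List.filter_congr this]

-- ===== VERDICT (by name: the statement is the Claim_ definition above) =====
theorem reverse_words_spec : Claim_equal_reverse_words := by
  intro text _
  show reverse_words text = reverse_words_alt text
  simp only [reverse_words, reverse_words_alt]
  rw [PySem.Str.slice?_none_none_neg_one, Option.getD_some, foldl_append_map,
    PySem.List.slice?_none_none_neg_one, Option.getD_some]
  rw [PySem.Str.join, PySem.Str.join]
  refine congrArg String.ofList (congrArg (PySem.Chars.join (String.toList " ")) ?_)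
  rw [PySem.Str.split₀, PySem.Str.split₀, String.toList_ofList, split₀_reverse]
  simp only [List.nil_append, List.map_reverse, List.reverse_reverse, List.map_map]
  refine List.map_congr_left (fun w _ => ?_)
  show ((PySem.Str.slice? (String.ofList w) none none (-1)).getD "").toList
      = (String.ofList w.reverse).toList
  rw [PySem.Str.slice?_none_none_neg_one, Option.getD_some, String.toList_ofList,
    String.toList_ofList, String.toList_ofList]
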